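-- pv_equiv track=rewrite | github.com/nnoah29/Zappy | src/ai/core/vision.py | get_case_index
-- ===== SOURCE A (Python) =====
-- def get_case_index(x: int, y: int) -> int:
--     """
--     Calcule l'index d'une case à partir de sa position.
--
--     Args:
--         x (int): Position X
--         y (int): Position Y
--
--     Returns:
--         int: Index de la case, ou -1 si hors champ de vision
--     """
--     if y < 0 or abs(x) > y:
--         return -1
--
--     # Calcul de l'index
--     index = 0
--     for i in range(y):
--         index += 2 * i + 1
--
--     index += x + y
--     return index
-- ===== SOURCE B (Python) =====
-- def get_case_index(x: int, y: int) -> int: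
--     # Count back from the last cell of row y: row y ends at (y+1)^2 - 1,
--     # and the cell (x, y) is (y - x) cells before that end.
--     if 0 <= y and -y <= x <= y:
--         return (y + 1) * (y + 1) - (y - x) - 1
--     return -1
-- ===== Notes on version B (the rewrite author's own statement) =====
-- stated objective: faster
-- what changed: Replaced the O(y) loop summing the first y odd numbers with a closed-form count back from the last cell of row y, (y+1)^2 - (y-x) - 1, with the in-vision test written as a direct interval check instead of abs; O(1) vs O(y).
import Mathlib
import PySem

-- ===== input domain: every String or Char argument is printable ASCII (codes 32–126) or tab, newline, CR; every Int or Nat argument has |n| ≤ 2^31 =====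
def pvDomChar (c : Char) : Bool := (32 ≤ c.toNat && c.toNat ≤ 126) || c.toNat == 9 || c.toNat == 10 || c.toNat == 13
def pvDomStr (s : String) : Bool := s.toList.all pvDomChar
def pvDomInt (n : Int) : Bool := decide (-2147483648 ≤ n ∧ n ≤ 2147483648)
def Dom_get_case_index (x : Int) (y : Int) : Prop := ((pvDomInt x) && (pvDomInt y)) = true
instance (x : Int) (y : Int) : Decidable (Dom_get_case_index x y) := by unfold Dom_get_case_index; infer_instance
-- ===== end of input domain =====

-- B replaces A's loop summing the first y odd numbers with a closed-form count back from the
-- last cell of row y ((y+1)^2 - (y-x) - 1), with the in-vision test as a direct interval check; O(1) vs O(y).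

-- ===== PORT A =====
def get_case_index (x : Int) (y : Int) : Int :=
  if y < 0 ∨ |x| > y then -1
  else
    let index : Int := (PySem.List.pyRange 0 y 1).foldl (fun index i => index + 2 * i + 1) 0
    index + x + y

-- ===== PORT B =====
def get_case_index_alt (x : Int) (y : Int) : Int :=
  if 0 ≤ y ∧ -y ≤ x ∧ x ≤ y then (y + 1) * (y + 1) - (y - x) - 1
  else -1

-- ===== PRECONDITION & SPEC =====
def Spec_get_case_index (x : Int) (y : Int) (out : Int) : Prop := out = get_case_index_alt x y
instance (x : Int) (y : Int) (out : Int) : Decidable (Spec_get_case_index x y out) := by unfold Spec_get_case_index; infer_instance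

-- ===== CLAIM (what is proved, stated in full; the proofs are below) =====
def Claim_equal_get_case_index : Prop := ∀ (x : Int) (y : Int), Dom_get_case_index x y → Spec_get_case_index x y (get_case_index x y)

-- ===== LEMMAS AND PROOFS =====

-- A's loop sums the first n odd numbers starting from any accumulator.
theorem sum_odd_range (n : Nat) (acc : Int) :
    (PySem.List.pyRange 0 n 1).foldl (fun index i => index + 2 * i + 1) acc = acc + n * n := by
  induction n generalizing acc with
  | zero => simp [PySem.List.pyRange]
  | succ k ih =>
      rw [show ((k + 1 : Nat) : Int) = (k : Int) + 1 from by push_cast; ring]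
      rw [PySem.List.pyRange_one_succ_right (a := 0) (b := (k : Int)) (Int.natCast_nonneg k)]
      simp [List.foldl_append, ih]
      ring

-- ===== VERDICT (by name: the statement is the Claim_ definition above) =====
theorem get_case_index_spec : Claim_equal_get_case_index := by
  intro x y _
  unfold Spec_get_case_index get_case_index get_case_index_alt
  rcases abs_cases x with ⟨hx, _⟩ | ⟨hx, _⟩ <;> split_ifs with h1 h2 <;> try omega
  all_goals
    rename_i h2
    obtain ⟨n, rfl⟩ := Int.eq_ofNat_of_zero_le h2.1
    show (PySem.List.pyRange 0 n 1).foldl (fun index i => index + 2 * i + 1) 0 + x + n = _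
    rw [sum_odd_range]
    ring
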